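-- pv_equiv track=rewrite | github.com/codesquad-backend-study/daily-algorithm-challenge | Sully/baekjoon/B1449.py | solution
-- ===== SOURCE A (Python) =====
-- from typing import List
--
-- def solution(L: int, waters: List[int]) -> int:
--     # 물이 새는 위치의 거리 < 테이프의 길이 -> 한 번에 막을 수 있음
--     answer = 1
--
--     waters.sort()
--
--     # 테이프 시작 위치
--     start = 0
--     for i in range(1, len(waters)):
--         # waters[i] - waters[start]: 물이 새는 위치의 거리
--         if waters[i] - waters[start] < L:
--             continue
--
--         # 테이프 시작 위치 업데이트
--         start = i
--         # 테이프 개수들 계속 추가해 나가자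
--         answer += 1
--
--     return answer
-- ===== SOURCE B (Python) =====
-- from typing import List
--
-- def _bisect_left_from(ws: List[int], bound: int, lo: int, hi: int) -> int:
--     # first index k in [lo, hi) with ws[k] >= bound, else hi (ws sorted)
--     while lo < hi:
--         mid = (lo + hi) // 2
--         if ws[mid] < bound:
--             lo = mid + 1
--         else:
--             hi = mid
--     return lo
--
-- def solution(L: int, waters: List[int]) -> int:
--     waters.sort()
--     answer = 1
--     i = 0
--     while i < len(waters):
--         nxt = _bisect_left_from(waters, waters[i] + L, i + 1, len(waters))
--         if nxt == len(waters):
--             break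
--         answer += 1
--         i = nxt
--     return answer
-- ===== Notes on version B (the rewrite author's own statement) =====
-- stated objective: alternative
-- what changed: Replaces A's flat index scan over every sorted position (compare each waters[i] against the current tape anchor) with a greedy jump loop: after sorting, each step anchors a tape at the current leak and a hand-rolled bisect_left binary search finds the first uncovered leak directly, skipping all covered positions.
import Mathlib
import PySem

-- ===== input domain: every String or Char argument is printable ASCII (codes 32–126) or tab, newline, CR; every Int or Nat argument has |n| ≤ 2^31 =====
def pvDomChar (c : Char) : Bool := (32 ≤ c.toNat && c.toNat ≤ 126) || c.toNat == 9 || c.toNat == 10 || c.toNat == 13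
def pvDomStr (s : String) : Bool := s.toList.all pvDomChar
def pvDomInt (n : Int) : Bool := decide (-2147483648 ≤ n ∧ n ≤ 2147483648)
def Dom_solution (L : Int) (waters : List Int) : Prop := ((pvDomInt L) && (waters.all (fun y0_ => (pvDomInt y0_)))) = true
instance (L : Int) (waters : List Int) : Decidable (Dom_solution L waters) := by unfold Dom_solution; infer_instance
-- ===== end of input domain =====

-- B replaces A's flat scan with a binary-search jump to the next uncovered leak; equal return values,
-- and both A and B sort `waters` in place (same side effect); the equivalence proved is about the return value.

-- ===== PORT A =====
def solution (L : Int) (waters : List Int) : Int :=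
  let ws := PySem.List.sorted waters (fun x => x) false
  let st := (PySem.List.pyRange 1 (ws.length : Int) 1).foldl
    (fun (p : Int × Int) i =>
      if PySem.List.pyGetD ws i 0 - PySem.List.pyGetD ws p.1 0 < L then p
      else (i, p.2 + 1)) (0, 1)
  st.2

-- ===== PORT B =====
-- hand-rolled bisect_left(ws, bound, lo, hi): first k in [lo, hi) with ws[k] >= bound, else hi (ws sorted).
-- The while loop is ported as structural recursion on a fuel that bounds its iteration count:
-- each pass shrinks hi - lo by at least 1, so (hi - lo).toNat passes suffice.
def pvBisectGo (ws : List Int) (bound : Int) : Nat → Int → Int → Int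
  | 0, lo, _ => lo
  | fuel + 1, lo, hi =>
    if lo < hi then
      if PySem.List.pyGetD ws (PySem.Int.floordiv (lo + hi) 2) 0 < bound then
        pvBisectGo ws bound fuel (PySem.Int.floordiv (lo + hi) 2 + 1) hi
      else pvBisectGo ws bound fuel lo (PySem.Int.floordiv (lo + hi) 2)
    else lo

def pvBisect (ws : List Int) (bound : Int) (lo hi : Int) : Int :=
  pvBisectGo ws bound (hi - lo).toNat lo hi

-- while i < len(waters): jump by binary search; i strictly grows each pass, so ws.length passes suffice
def pvOuterGo (L : Int) (ws : List Int) : Nat → Int → Int → Int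
  | 0, _, answer => answer
  | fuel + 1, i, answer =>
    if i < (ws.length : Int) then
      let nxt := pvBisect ws (PySem.List.pyGetD ws i 0 + L) (i + 1) (ws.length : Int)
      if nxt == (ws.length : Int) then answer
      else pvOuterGo L ws fuel nxt (answer + 1)
    else answer

def solution_alt (L : Int) (waters : List Int) : Int :=
  let ws := PySem.List.sorted waters (fun x => x) false
  pvOuterGo L ws ws.length 0 1

-- ===== PRECONDITION & SPEC =====
def Spec_solution (L : Int) (waters : List Int) (out : Int) : Prop := out = solution_alt L waters
instance (L : Int) (waters : List Int) (out : Int) : Decidable (Spec_solution L waters out) := by unfold Spec_solution; infer_instance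

-- ===== CLAIM (what is proved, stated in full; the proofs are below) =====
def Claim_equal_solution : Prop := ∀ (L : Int) (waters : List Int), Dom_solution L waters → Spec_solution L waters (solution L waters)

-- ===== LEMMAS AND PROOFS =====

-- the greedy count both programs compute on the sorted list: pvFA L v xs = extra tapes for xs, current tape anchored at v
def pvFA (L v : Int) : List Int → Int
  | [] => 0
  | x :: xs => if x - v < L then pvFA L v xs else 1 + pvFA L x xs

-- A's fold from index j with anchor index s computes pvFA on the dropped suffix
theorem foldA (L : Int) (ws : List Int) : ∀ (fuel j s : Nat) (ans : Int),
    ws.length - j ≤ fuel → s < j → j ≤ ws.length →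
    ((PySem.List.pyRange (j : Int) (ws.length : Int) 1).foldl
      (fun (p : Int × Int) i =>
        if PySem.List.pyGetD ws i 0 - PySem.List.pyGetD ws p.1 0 < L then p
        else (i, p.2 + 1)) ((s : Int), ans)).2
    = ans + pvFA L (ws.getD s 0) (ws.drop j) := by
  intro fuel
  induction fuel with
  | zero =>
      intro j s ans hf hsj hj
      have hj' : j = ws.length := by omega
      subst hj'
      rw [PySem.List.pyRange_one_eq_nil (by omega)]
      simp [pvFA]
  | succ n ih =>
      intro j s ans hf hsj hj
      by_cases hjl : j < ws.length
      · rw [PySem.List.pyRange_one_cons (by exact_mod_cast hjl)]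
        rw [List.drop_eq_getElem_cons hjl]
        simp only [List.foldl_cons, PySem.List.pyGetD_natCast]
        rw [List.getD_eq_getElem ws 0 hjl, List.getD_eq_getElem ws 0 (by omega : s < ws.length)]
        by_cases hc : ws[j] - ws[s] < L
        · rw [if_pos hc]
          have hcast : ((j : Int) + 1) = ((j + 1 : Nat) : Int) := by push_cast; ring
          rw [hcast, ih (j+1) s ans (by omega) (by omega) (by omega)]
          rw [List.getD_eq_getElem ws 0 (by omega : s < ws.length)]
          simp [pvFA, hc]
        · rw [if_neg hc]
          have hcast : ((j : Int) + 1) = ((j + 1 : Nat) : Int) := by push_cast; ring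
          rw [hcast, ih (j+1) j (ans+1) (by omega) (by omega) (by omega)]
          rw [List.getD_eq_getElem ws 0 hjl]
          simp only [pvFA, if_neg hc]
          ring
      · have hj' : j = ws.length := by omega
        subst hj'
        rw [PySem.List.pyRange_one_eq_nil (by omega)]
        simp [pvFA]

-- a sorted list is monotone under getD
theorem getD_mono (ws : List Int) (hsort : ws.Pairwise (· ≤ ·)) :
    ∀ (p q : Nat), p ≤ q → q < ws.length → ws.getD p 0 ≤ ws.getD q 0 := by
  intro p q hpq hq
  rw [List.getD_eq_getElem ws 0 (by omega), List.getD_eq_getElem ws 0 hq]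
  rcases Nat.lt_or_ge p q with h | h
  · exact (List.pairwise_iff_getElem.mp hsort) p q (by omega) hq h
  · have : p = q := by omega
    subst this; rfl

-- the fuel (hi - lo).toNat is enough: pvBisectGo's result lies in [lo, hi]
theorem pvBisectGo_le (ws : List Int) (bound : Int) : ∀ (fuel : Nat) (lo hi : Int),
    (hi - lo).toNat ≤ fuel → lo ≤ hi →
    lo ≤ pvBisectGo ws bound fuel lo hi ∧ pvBisectGo ws bound fuel lo hi ≤ hi := by
  intro fuel
  induction fuel with
  | zero =>
      intro lo hi hf hle
      simp only [pvBisectGo]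
      omega
  | succ n ih =>
      intro lo hi hf hle
      by_cases hlt : lo < hi
      · rw [pvBisectGo, if_pos hlt]
        set mid := PySem.Int.floordiv (lo + hi) 2 with hmid
        have hm : lo ≤ mid ∧ mid < hi := by
          simp only [hmid, PySem.Int.floordiv, Int.fdiv_eq_ediv]; omega
        by_cases hcmp : PySem.List.pyGetD ws mid 0 < bound
        · rw [if_pos hcmp]
          have := ih (mid + 1) hi (by omega) (by omega)
          omega
        · rw [if_neg hcmp]
          have := ih lo mid (by omega) (by omega)
          omega
      · rw [pvBisectGo, if_neg hlt]; omega

theorem pvBisect_le (ws : List Int) (bound : Int) (lo hi : Int) (hle : lo ≤ hi) :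
    lo ≤ pvBisect ws bound lo hi ∧ pvBisect ws bound lo hi ≤ hi := by
  unfold pvBisect
  exact pvBisectGo_le ws bound (hi - lo).toNat lo hi (le_refl _) hle

-- binary-search specification on a sorted list
theorem pvBisectGo_spec (ws : List Int) (hsort : ws.Pairwise (· ≤ ·)) (bound : Int) :
    ∀ (fuel : Nat) (lo hi : Int), (hi - lo).toNat ≤ fuel → 0 ≤ lo → lo ≤ hi → hi ≤ (ws.length : Int) →
    (∀ (j : Nat), lo ≤ (j : Int) → (j : Int) < pvBisectGo ws bound fuel lo hi → ws.getD j 0 < bound) ∧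
    (pvBisectGo ws bound fuel lo hi < hi → bound ≤ ws.getD (pvBisectGo ws bound fuel lo hi).toNat 0) := by
  intro fuel
  induction fuel with
  | zero =>
      intro lo hi hf h0 hle hhi
      simp only [pvBisectGo]
      exact ⟨fun j h1 h2 => absurd (lt_of_le_of_lt h1 h2) (by omega), fun h => absurd h (by omega)⟩
  | succ n ih =>
      intro lo hi hf h0 hle hhi
      by_cases hlt : lo < hi
      · rw [pvBisectGo, if_pos hlt]
        set mid := PySem.Int.floordiv (lo + hi) 2 with hmid
        have hm : lo ≤ mid ∧ mid < hi := by
          simp only [hmid, PySem.Int.floordiv, Int.fdiv_eq_ediv]; omega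
        have hmN : ((mid.toNat : Nat) : Int) = mid := by omega
        have hmval : PySem.List.pyGetD ws mid 0 = ws.getD mid.toNat 0 := by
          conv_lhs => rw [← hmN]
          rw [PySem.List.pyGetD_natCast]
        by_cases hcmp : PySem.List.pyGetD ws mid 0 < bound
        · rw [if_pos hcmp]
          have hrec := ih (mid + 1) hi (by omega) (by omega) (by omega) hhi
          have hlb := pvBisectGo_le ws bound n (mid + 1) hi (by omega) (by omega)
          refine ⟨?_, hrec.2⟩
          intro j hjlo hjlt
          rcases Int.lt_or_le (j : Int) (mid + 1) with hj | hj
          · have hle2 := getD_mono ws hsort j mid.toNat (by omega) (by omega)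
            rw [hmval] at hcmp
            omega
          · exact hrec.1 j (by omega) hjlt
        · rw [if_neg hcmp]
          have hrec := ih lo mid (by omega) (by omega) (by omega) (by omega)
          have hlb := pvBisectGo_le ws bound n lo mid (by omega) (by omega)
          refine ⟨hrec.1, ?_⟩
          intro _hlt2
          rcases Int.lt_or_le (pvBisectGo ws bound n lo mid) mid with h | h
          · exact hrec.2 h
          · have hres : pvBisectGo ws bound n lo mid = mid := by omega
            rw [hres, ← hmval]
            omega
      · rw [pvBisectGo, if_neg hlt]
        exact ⟨fun j h1 h2 => absurd (lt_of_le_of_lt h1 h2) (by omega), fun h => absurd h (by omega)⟩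

theorem pvBisect_spec (ws : List Int) (hsort : ws.Pairwise (· ≤ ·)) (bound : Int)
    (lo hi : Int) (h0 : 0 ≤ lo) (hle : lo ≤ hi) (hhi : hi ≤ (ws.length : Int)) :
    (∀ (j : Nat), lo ≤ (j : Int) → (j : Int) < pvBisect ws bound lo hi → ws.getD j 0 < bound) ∧
    (pvBisect ws bound lo hi < hi → bound ≤ ws.getD (pvBisect ws bound lo hi).toNat 0) := by
  unfold pvBisect
  exact pvBisectGo_spec ws hsort bound (hi - lo).toNat lo hi (le_refl _) h0 hle hhi

-- pvFA ignores a covered prefix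
theorem pvFA_dropCov (L v : Int) (ws : List Int) : ∀ (fuel p q : Nat),
    q - p ≤ fuel → p ≤ q → q ≤ ws.length →
    (∀ (j : Nat), p ≤ j → j < q → ws.getD j 0 - v < L) →
    pvFA L v (ws.drop p) = pvFA L v (ws.drop q) := by
  intro fuel
  induction fuel with
  | zero =>
      intro p q hf hpq hq _
      have : p = q := by omega
      subst this; rfl
  | succ n ih =>
      intro p q hf hpq hq hcov
      rcases Nat.lt_or_ge p q with h | h
      · have hpl : p < ws.length := by omega
        rw [List.drop_eq_getElem_cons hpl]
        have hc : ws[p] - v < L := by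
          have := hcov p (by omega) h
          rwa [List.getD_eq_getElem ws 0 hpl] at this
        simp only [pvFA, if_pos hc]
        exact ih (p+1) q (by omega) (by omega) hq (fun j h1 h2 => hcov j (by omega) h2)
      · have : p = q := by omega
        subst this; rfl

-- B's outer loop computes pvFA on the dropped suffix (fuel covers the remaining iterations)
theorem outerB (L : Int) (ws : List Int) (hsort : ws.Pairwise (· ≤ ·)) :
    ∀ (fuel i : Nat) (ans : Int), ws.length - i ≤ fuel → i < ws.length →
    pvOuterGo L ws fuel (i : Int) ans = ans + pvFA L (ws.getD i 0) (ws.drop (i+1)) := by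
  intro fuel
  induction fuel with
  | zero => intro i ans hf hi; omega
  | succ n ih =>
      intro i ans hf hi
      rw [pvOuterGo]
      have hil : (i : Int) < (ws.length : Int) := by exact_mod_cast hi
      rw [if_pos hil]
      simp only [PySem.List.pyGetD_natCast]
      set bound := ws.getD i 0 + L with hbound
      set nxt := pvBisect ws bound ((i : Int) + 1) (ws.length : Int) with hnxt
      have hlb := pvBisect_le ws bound ((i : Int) + 1) (ws.length : Int) (by omega)
      have hspec := pvBisect_spec ws hsort bound ((i : Int) + 1) (ws.length : Int)
        (by omega) (by omega) (by omega)
      rw [← hnxt] at hlb hspec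
      by_cases hend : nxt = (ws.length : Int)
      · rw [if_pos (by simp [hend])]
        have hcov : ∀ (j : Nat), i + 1 ≤ j → j < ws.length → ws.getD j 0 - ws.getD i 0 < L := by
          intro j h1 h2
          have := hspec.1 j (by omega) (by omega)
          omega
        have hdrop := pvFA_dropCov L (ws.getD i 0) ws (ws.length - (i+1)) (i+1) ws.length
          (by omega) (by omega) (by omega) hcov
        rw [hdrop]
        simp [pvFA]
      · rw [if_neg (by simp [hend])]
        have hnl : nxt < (ws.length : Int) := by omega
        set k := nxt.toNat with hk
        have hkc : (k : Int) = nxt := by omega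
        have hki : i < k := by omega
        have hkl : k < ws.length := by omega
        have hcov : ∀ (j : Nat), i + 1 ≤ j → j < k → ws.getD j 0 - ws.getD i 0 < L := by
          intro j h1 h2
          have := hspec.1 j (by omega) (by omega)
          omega
        have hunc : ¬ (ws.getD k 0 - ws.getD i 0 < L) := by
          have := hspec.2 hnl
          omega
        rw [← hkc, ih k (ans + 1) (by omega) hkl]
        have hstep := pvFA_dropCov L (ws.getD i 0) ws (k - (i+1)) (i+1) k
          (by omega) (by omega) (by omega) hcov
        rw [hstep, List.drop_eq_getElem_cons hkl]
        simp only [pvFA, if_neg (by rwa [List.getD_eq_getElem ws 0 hkl] at hunc)]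
        rw [List.getD_eq_getElem ws 0 hkl]
        ring

-- the two programs agree on any (sorted) working list
theorem mainEq (L : Int) (ws : List Int) (hsort : ws.Pairwise (· ≤ ·)) :
    ((PySem.List.pyRange 1 (ws.length : Int) 1).foldl
      (fun (p : Int × Int) i =>
        if PySem.List.pyGetD ws i 0 - PySem.List.pyGetD ws p.1 0 < L then p
        else (i, p.2 + 1)) (0, 1)).2
    = pvOuterGo L ws ws.length 0 1 := by
  by_cases hn : ws.length = 0
  · rw [PySem.List.pyRange_one_eq_nil (by simp [hn]), hn]
    simp [pvOuterGo]
  · have h1 : 0 < ws.length := by omega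
    have hA := foldA L ws ws.length 1 0 1 (by omega) (by omega) (by omega)
    have hB := outerB L ws hsort ws.length 0 1 (by omega) h1
    simp only [Nat.cast_one, Nat.cast_zero] at hA hB
    rw [hA, hB]

-- ===== VERDICT (by name: the statement is the Claim_ definition above) =====
theorem solution_spec : Claim_equal_solution := by
  intro L waters _dom
  exact mainEq L (PySem.List.sorted waters (fun x => x) false)
    (PySem.List.sorted_pairwise waters (fun x => x))
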